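-- pv_equiv track=rewrite | github.com/hazarn01/ED_BOT_V8 | src/ingestion/pdf_processor.py | extract_text_from_spans
-- ===== SOURCE A (Python) =====
-- from typing import Dict, List, Optional
--
-- def extract_text_from_spans(spans: List[Dict], start_char: int, end_char: int) -> str:
--     """Extract text from specific character range using span data."""
--     text_parts = []
--     current_pos = 0
--
--     for span in spans:
--         span_start = current_pos
--         span_end = current_pos + len(span["text"])
--
--         # Check if this span overlaps with our range
--         if span_start < end_char and span_end > start_char:
--             # Calculate the part of the span we want
--             extract_start = max(0, start_char - span_start)
--             extract_end = min(len(span["text"]), end_char - span_start)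
--
--             if extract_end > extract_start:
--                 text_parts.append(span["text"][extract_start:extract_end])
--
--         current_pos = span_end
--
--     return "".join(text_parts)
-- ===== SOURCE B (Python) =====
-- def extract_text_from_spans(spans, start_char, end_char):
--     """Extract text from specific character range using span data."""
--     full = "".join(span["text"] for span in spans)
--     return full[max(0, start_char):max(0, end_char)]
-- ===== Notes on version B (the rewrite author's own statement) =====
-- stated objective: simpler
-- what changed: B concatenates all span texts once and returns a single clamped slice of the full text, instead of A's running-offset loop with per-span overlap tests and partial slices.
import Mathlib
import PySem

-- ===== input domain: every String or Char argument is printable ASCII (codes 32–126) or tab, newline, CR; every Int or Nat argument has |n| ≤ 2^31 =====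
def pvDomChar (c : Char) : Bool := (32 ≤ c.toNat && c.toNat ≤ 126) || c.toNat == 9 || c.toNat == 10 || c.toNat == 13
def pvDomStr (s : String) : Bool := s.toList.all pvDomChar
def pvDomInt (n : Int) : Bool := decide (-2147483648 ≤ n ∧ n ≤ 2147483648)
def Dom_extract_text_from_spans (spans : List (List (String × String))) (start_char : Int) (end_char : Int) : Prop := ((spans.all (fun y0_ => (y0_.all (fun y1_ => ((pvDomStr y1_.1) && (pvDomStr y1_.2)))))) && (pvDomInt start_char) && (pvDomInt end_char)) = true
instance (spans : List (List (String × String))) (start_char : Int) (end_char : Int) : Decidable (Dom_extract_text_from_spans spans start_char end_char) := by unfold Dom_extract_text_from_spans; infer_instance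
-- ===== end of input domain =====

-- B replaces A's running-offset loop (per-span overlap tests and partial slices)
-- by concatenating all span texts once and taking a single clamped slice: simpler, same cost.


-- ===== PORT A =====
-- one loop step of A; span["text"] is a Dict lookup, Pre_ guarantees the key is present
def pvStepA (start_char end_char : Int) (st : List String × Int) (span : List (String × String)) : List String × Int :=
  let t := (PySem.Dict.mk span).getD "text" ""
  let span_start := st.2
  let span_end := st.2 + PySem.Str.len t
  if span_start < end_char ∧ start_char < span_end then
    let extract_start := max 0 (start_char - span_start)
    let extract_end := min (PySem.Str.len t) (end_char - span_start)
    if extract_start < extract_end then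
      (st.1 ++ [PySem.Str.slice t (some extract_start) (some extract_end)], span_end)
    else (st.1, span_end)
  else (st.1, span_end)

def extract_text_from_spans (spans : List (List (String × String))) (start_char : Int) (end_char : Int) : String :=
  let r := spans.foldl (pvStepA start_char end_char) ([], 0)
  PySem.Str.join "" r.1

-- ===== PORT B =====
def extract_text_from_spans_alt (spans : List (List (String × String))) (start_char : Int) (end_char : Int) : String :=
  let full := PySem.Str.join "" (spans.map (fun span => (PySem.Dict.mk span).getD "text" ""))
  PySem.Str.slice full (some (max 0 start_char)) (some (max 0 end_char))

-- ===== PRECONDITION & SPEC =====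
-- Pre_ excludes exactly the inputs where Python A raises KeyError: a span without a "text" key.
def Pre_extract_text_from_spans (spans : List (List (String × String))) (start_char : Int) (end_char : Int) : Prop :=
  ∀ span ∈ spans, (PySem.Dict.mk span).contains "text" = true
instance (spans : List (List (String × String))) (start_char : Int) (end_char : Int) : Decidable (Pre_extract_text_from_spans spans start_char end_char) := by unfold Pre_extract_text_from_spans; infer_instance

def pvWitness_extract_text_from_spans : (List (List (String × String))) × Int × Int :=
  ([[("text", "Hello ")], [("text", "world!")]], 2, 8)

def Spec_extract_text_from_spans (spans : List (List (String × String))) (start_char : Int) (end_char : Int) (out : String) : Prop := out = extract_text_from_spans_alt spans start_char end_char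
instance (spans : List (List (String × String))) (start_char : Int) (end_char : Int) (out : String) : Decidable (Spec_extract_text_from_spans spans start_char end_char out) := by unfold Spec_extract_text_from_spans; infer_instance

-- ===== CLAIM (what is proved, stated in full; the proofs are below) =====
def Claim_equal_extract_text_from_spans : Prop := ∀ (spans : List (List (String × String))) (start_char : Int) (end_char : Int), Dom_extract_text_from_spans spans start_char end_char → Pre_extract_text_from_spans spans start_char end_char → Spec_extract_text_from_spans spans start_char end_char (extract_text_from_spans spans start_char end_char)

-- ===== LEMMAS AND PROOFS =====

-- the span texts as char lists
def pvTexts (spans : List (List (String × String))) : List (List Char) :=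
  spans.map (fun sp => ((PySem.Dict.mk sp).getD "text" "").toList)

-- slice with already-clamped Nat bounds
def pvSliceN (xs : List Char) (a b : Nat) : List Char := (xs.drop a).take (b - a)

-- the per-span parts A collects, with the running offset folded into shifted bounds
def pvParts (s e : Int) : List (List Char) → List (List Char)
  | [] => []
  | t :: ts =>
    (if (0:Int) < e ∧ s < (t.length : Int) then
       if max 0 s < min (t.length : Int) e then
         PySem.Chars.slice t (some (max 0 s)) (some (min (t.length : Int) e))
       else []
     else []) :: pvParts (s - t.length) (e - t.length) ts

lemma pvJoinEmpty (l : List String) :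
    (PySem.Str.join "" l).toList = (l.map String.toList).flatten := by
  rw [PySem.Str.toList_join]
  generalize l.map String.toList = xs
  induction xs with
  | nil => simp [PySem.Chars.join_nil]
  | cons p rest ih =>
    cases rest with
    | nil => simp [PySem.Chars.join, List.intercalate]
    | cons q r => simpa [PySem.Chars.join_cons_cons] using ih

lemma pvLoopA (s e : Int) : ∀ (spans : List (List (String × String))) (acc : List String) (c : Int),
    ((spans.foldl (pvStepA s e) (acc, c)).1.map String.toList).flatten
      = (acc.map String.toList).flatten ++ (pvParts (s - c) (e - c) (pvTexts spans)).flatten := by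
  intro spans
  induction spans with
  | nil => intro acc c; simp [pvParts, pvTexts]
  | cons sp sps ih =>
    intro acc c
    have hlen := PySem.Str.len_eq ((PySem.Dict.mk sp).getD "text" "")
    simp only [List.foldl_cons, pvStepA, pvTexts, List.map_cons, pvParts, hlen]
    have hsh : ∀ d : Int, s - c - d = s - (c + d) := by intro d; ring
    have hsh' : ∀ d : Int, e - c - d = e - (c + d) := by intro d; ring
    split_ifs with h1 h2 h3 h4 h5 h6 <;>
      simp only [ih, List.map_append, List.flatten_append, List.map_cons, List.flatten_cons,
        List.map_nil, List.flatten_nil, List.append_assoc, List.nil_append, List.append_nil,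
        PySem.Str.toList_slice, PySem.Chars.slice_eq_listSlice, PySem.Chars.slice_eq_listSlice,
        hsh, hsh'] <;>
      first | omega | simp [pvTexts]

lemma pvSliceN_append (t r : List Char) (a b : Nat) :
    pvSliceN (t ++ r) a b = pvSliceN t a b ++ pvSliceN r (a - t.length) (b - t.length) := by
  unfold pvSliceN
  rw [List.drop_append, List.take_append]
  congr 2
  simp only [List.length_drop]
  omega

lemma pvHead (t : List Char) (s e : Int) :
    (if (0:Int) < e ∧ s < (t.length : Int) then
       if max 0 s < min (t.length : Int) e then
         PySem.Chars.slice t (some (max 0 s)) (some (min (t.length : Int) e))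
       else []
     else []) = pvSliceN t (max 0 s).toNat (max 0 e).toNat := by
  unfold pvSliceN
  split_ifs with h1 h2
  · rw [PySem.Chars.slice_eq_listSlice,
      PySem.List.slice_toNat _ (le_max_left 0 s) (by omega)]
    by_cases he : e ≤ (t.length : Int)
    · congr 1; omega
    · rw [List.take_of_length_le (by simp only [List.length_drop]; omega),
        List.take_of_length_le (by simp only [List.length_drop]; omega)]
  · by_cases hc : (t.length : Int) ≤ max 0 s
    · rw [List.drop_eq_nil_of_le (by omega)]; simp
    · have hz : (max 0 e).toNat - (max 0 s).toNat = 0 := by omega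
      simp [hz]
  · by_cases hc : (t.length : Int) ≤ max 0 s
    · rw [List.drop_eq_nil_of_le (by omega)]; simp
    · have hz : (max 0 e).toNat - (max 0 s).toNat = 0 := by omega
      simp [hz]

lemma pvPartsFlatten (texts : List (List Char)) : ∀ (s e : Int),
    (pvParts s e texts).flatten = pvSliceN texts.flatten (max 0 s).toNat (max 0 e).toNat := by
  induction texts with
  | nil => intro s e; simp [pvParts, pvSliceN]
  | cons t ts ih =>
    intro s e
    simp only [pvParts, List.flatten_cons, List.flatten, pvHead, ih, List.flatten_cons]
    rw [List.append_eq, pvSliceN_append]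
    congr 2 <;> omega

-- ===== VERDICT (by name: the statement is the Claim_ definition above) =====
theorem extract_text_from_spans_spec : Claim_equal_extract_text_from_spans := by
  intro spans s e _ _
  unfold Spec_extract_text_from_spans extract_text_from_spans extract_text_from_spans_alt
  apply String.toList_injective
  rw [pvJoinEmpty, PySem.Str.toList_slice, PySem.Chars.slice_eq_listSlice,
    PySem.List.slice_toNat _ (le_max_left 0 s) (le_max_left 0 e), pvJoinEmpty]
  have h := pvLoopA s e spans [] 0
  simp only [sub_zero, List.map_nil, List.flatten_nil, List.nil_append] at h
  rw [h, pvPartsFlatten]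
  simp only [pvSliceN, pvTexts]
  simp only [List.map_map, Function.comp_def]
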